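-- pv_equiv track=rewrite | github.com/lukefadedaway/adventofcode | 2023/Day 12/sol.py | checkconf
-- ===== SOURCE A (Python) =====
-- def checkconf(springs, numbers):
--     groups = [x for x in springs.split('.') if len(x)]
--     if not len(groups) == len(numbers):
--         return 0
--     for i in range(len(numbers)):
--         if not len(groups[i]) == numbers[i]:
--             return 0
--     return 1
-- ===== SOURCE B (Python) =====
-- def checkconf(springs, numbers):
--     it = iter(numbers)
--     run = 0
--     for ch in springs + '.':  # sentinel dot flushes the final run
--         if ch != '.':
--             run += 1
--         elif run:
--             if next(it, None) != run:
--                 return 0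
--             run = 0
--     return 1 if next(it, None) is None else 0
-- ===== Notes on version B (the rewrite author's own statement) =====
-- stated objective: alternative
-- what changed: Replaces split('.')+filter+indexed comparison loop with a single pass over the characters keeping a run-length counter and consuming the expected lengths from an iterator, comparing each run as it ends.
import Mathlib
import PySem

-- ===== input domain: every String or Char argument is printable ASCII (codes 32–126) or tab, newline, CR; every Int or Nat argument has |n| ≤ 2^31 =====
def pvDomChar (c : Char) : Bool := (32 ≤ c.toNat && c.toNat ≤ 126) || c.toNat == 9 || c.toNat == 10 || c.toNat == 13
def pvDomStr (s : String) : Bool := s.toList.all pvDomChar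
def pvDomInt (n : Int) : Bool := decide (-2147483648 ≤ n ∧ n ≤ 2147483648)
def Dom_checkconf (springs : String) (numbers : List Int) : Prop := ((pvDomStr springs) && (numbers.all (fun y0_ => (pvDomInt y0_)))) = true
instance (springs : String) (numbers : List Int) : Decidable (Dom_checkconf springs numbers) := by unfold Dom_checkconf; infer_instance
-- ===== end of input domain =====

-- B replaces A's split('.')-filter-then-compare-by-index with a single pass over the
-- characters keeping a run-length counter, consuming expected lengths as runs end
-- (alternative decomposition, same asymptotic cost).

-- ===== PORT A =====
-- the 'for i in range(len(numbers))' loop with early 'return 0'; groups[i] / numbers[i]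
-- are in range whenever the loop body runs because the preceding length test passed,
-- so getD transliterates the always-in-range Python indexing exactly
def checkconfLoop (groups : List (List Char)) (numbers : List Int) (i : Nat) : Int :=
  if i < numbers.length then
    if ¬ ((groups.getD i []).length : Int) = numbers.getD i 0 then 0
    else checkconfLoop groups numbers (i + 1)
  else 1
termination_by numbers.length - i

def checkconf (springs : String) (numbers : List Int) : Int :=
  -- groups = [x for x in springs.split('.') if len(x)]
  let groups := (PySem.Chars.splitOn springs.toList ['.']).filter (fun x => !(x.length == 0))
  if ¬ groups.length = numbers.length then 0
  else checkconfLoop groups numbers 0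

-- ===== PORT B =====
-- single pass over springs + '.'; the Int list plays Source B's iterator: taking its head = next(it)
def checkconfAltLoop : List Char → Nat → List Int → Int
  | [], _run, nums => if nums.isEmpty then 1 else 0
  | c :: rest, run, nums =>
    if c ≠ '.' then checkconfAltLoop rest (run + 1) nums
    else if run ≠ 0 then
      match nums with
      | [] => 0
      | n :: ns => if ¬ n = (run : Int) then 0 else checkconfAltLoop rest 0 ns
    else checkconfAltLoop rest 0 nums

def checkconf_alt (springs : String) (numbers : List Int) : Int :=
  checkconfAltLoop (springs.toList ++ ['.']) 0 numbers

-- ===== PRECONDITION & SPEC =====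
def Spec_checkconf (springs : String) (numbers : List Int) (out : Int) : Prop := out = checkconf_alt springs numbers
instance (springs : String) (numbers : List Int) (out : Int) : Decidable (Spec_checkconf springs numbers out) := by unfold Spec_checkconf; infer_instance

-- ===== CLAIM (what is proved, stated in full; the proofs are below) =====
def Claim_equal_checkconf : Prop := ∀ (springs : String) (numbers : List Int), Dom_checkconf springs numbers → Spec_checkconf springs numbers (checkconf springs numbers)

-- ===== LEMMAS AND PROOFS =====

-- proof-side reference splitter: splitOn '.' with the current group accumulated un-reversed
def mysplit (pre : List Char) : List Char → List (List Char)
  | [] => [pre]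
  | c :: rest => if c = '.' then pre :: mysplit [] rest else mysplit (pre ++ [c]) rest

-- proof-side: the run lengths of cs, given a pending run of length `run`
def runsFrom (run : Nat) : List Char → List Int
  | [] => if run ≠ 0 then [(run : Int)] else []
  | c :: rest =>
    if c ≠ '.' then runsFrom (run + 1) rest
    else if run ≠ 0 then (run : Int) :: runsFrom 0 rest else runsFrom 0 rest

theorem go_spec : ∀ (fuel : Nat) (l cur : List Char) (acc : List (List Char)),
    l.length < fuel →
    PySem.Chars.splitOn.go ['.'] fuel l cur acc = acc.reverse ++ mysplit cur.reverse l := by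
  intro fuel
  induction fuel with
  | zero => intro l cur acc h; omega
  | succ n ih =>
    intro l cur acc h
    cases l with
    | nil => simp [PySem.Chars.splitOn.go, mysplit]
    | cons c rest =>
      rw [PySem.Chars.splitOn.go]
      by_cases hc : c = '.'
      · subst hc
        simp [mysplit, List.isPrefixOf]
        rw [ih]
        · simp
        · simpa using Nat.lt_of_succ_lt_succ h
      · simp [mysplit, List.isPrefixOf, hc, Ne.symm hc]
        rw [ih]
        · simp
        · simpa using Nat.lt_of_succ_lt_succ h

theorem splitOn_eq_mysplit (cs : List Char) :
    PySem.Chars.splitOn cs ['.'] = mysplit [] cs := by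
  rw [PySem.Chars.splitOn, go_spec] <;> simp

theorem mysplit_lens (cs : List Char) : ∀ (pre : List Char),
    ((mysplit pre cs).filter (fun x => !(x.length == 0))).map (fun g => (g.length : Int))
      = runsFrom pre.length cs := by
  induction cs with
  | nil =>
    intro pre
    by_cases hp : pre.length = 0 <;> simp [mysplit, runsFrom, hp]
  | cons c rest ih =>
    intro pre
    by_cases hc : c = '.'
    · subst hc
      by_cases hp : pre.length = 0 <;>
        simp [mysplit, runsFrom, hp, ih]
    · rw [show mysplit pre (c :: rest) = mysplit (pre ++ [c]) rest by simp [mysplit, hc]]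
      rw [ih (pre ++ [c])]
      simp [runsFrom, hc]

theorem altLoop_spec (cs : List Char) : ∀ (run : Nat) (nums : List Int),
    checkconfAltLoop (cs ++ ['.']) run nums = if runsFrom run cs = nums then 1 else 0 := by
  induction cs with
  | nil =>
    intro run nums
    by_cases hr : run = 0
    · subst hr
      cases nums <;> simp [checkconfAltLoop, runsFrom]
    · cases nums with
      | nil => simp [checkconfAltLoop, runsFrom, hr]
      | cons n ns =>
        by_cases hn : n = (run : Int)
        · subst hn
          cases ns <;> simp [checkconfAltLoop, runsFrom, hr]
        · simp [checkconfAltLoop, runsFrom, hr, hn, Ne.symm hn]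
  | cons c rest ih =>
    intro run nums
    by_cases hc : c = '.'
    · subst hc
      by_cases hr : run = 0
      · subst hr
        simp [checkconfAltLoop, runsFrom, ih]
      · cases nums with
        | nil => simp [checkconfAltLoop, runsFrom, hr]
        | cons n ns =>
          by_cases hn : n = (run : Int)
          · subst hn
            simp [checkconfAltLoop, runsFrom, hr, ih]
          · simp [checkconfAltLoop, runsFrom, hr, hn, Ne.symm hn]
    · simp [checkconfAltLoop, runsFrom, hc, ih]

theorem aLoop_spec (gs : List (List Char)) (nums : List Int) (h : gs.length = nums.length) :
    ∀ i, checkconfLoop gs nums i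
      = if (gs.map (fun g => (g.length : Int))).drop i = nums.drop i then 1 else 0 := by
  intro i
  induction hk : nums.length - i using Nat.strong_induction_on generalizing i with
  | _ k ih =>
  by_cases hi : i < nums.length
  · have higs : i < gs.length := by omega
    have h1 : (gs.map (fun g => (g.length : Int))).drop i
        = ((gs[i].length : Int)) :: (gs.map (fun g => (g.length : Int))).drop (i+1) := by
      rw [List.drop_eq_getElem_cons (by simpa using higs)]; simp
    have h2 : nums.drop i = nums[i] :: nums.drop (i+1) := List.drop_eq_getElem_cons hi
    have hg : gs.getD i [] = gs[i] := List.getD_eq_getElem gs [] higs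
    have hn : nums.getD i 0 = nums[i] := List.getD_eq_getElem nums 0 hi
    have hcond : ((gs.map (fun g => (g.length : Int))).drop i = nums.drop i)
        ↔ (((gs[i].length : Int)) = nums[i]
            ∧ (gs.map (fun g => (g.length : Int))).drop (i+1) = nums.drop (i+1)) := by
      rw [h1, h2, List.cons_eq_cons]
    rw [checkconfLoop, if_pos hi, hg, hn]
    by_cases he : ((gs[i].length : Int)) = nums[i]
    · rw [if_neg (by simp [he]), ih (nums.length - (i+1)) (by omega) (i+1) rfl]
      simp only [hcond]
      simp [he]
    · rw [if_pos (by simp [he])]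
      simp only [hcond]
      rw [if_neg (by simp [he])]
  · rw [checkconfLoop, if_neg hi]
    rw [List.drop_eq_nil_of_le (by simp; omega), List.drop_eq_nil_of_le (by omega)]
    simp

-- ===== VERDICT (by name: the statement is the Claim_ definition above) =====
theorem checkconf_spec : Claim_equal_checkconf := by
  intro springs numbers _
  unfold Spec_checkconf checkconf checkconf_alt
  rw [altLoop_spec]
  set groups := (PySem.Chars.splitOn springs.toList ['.']).filter (fun x => !(x.length == 0)) with hgdef
  have hruns : runsFrom 0 springs.toList = groups.map (fun g => (g.length : Int)) := by
    rw [hgdef, splitOn_eq_mysplit]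
    exact (mysplit_lens springs.toList []).symm
  by_cases hl : groups.length = numbers.length
  · rw [if_neg (by simp [hl]), aLoop_spec groups numbers hl 0]
    simp [hruns]
  · rw [if_pos (by simp [hl]), if_neg]
    intro hcon
    rw [hruns] at hcon
    exact hl (by simpa using congrArg List.length hcon)
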